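-- pv_equiv track=rewrite | github.com/eternaljoyy/PracticeProblems | Leetcode/Q_929_UnqieEmails_ListSol.py | splitEmails
-- ===== SOURCE A (Python) =====
-- def splitEmails(email):
--     '''
--     Handle the splitting of the emails
--     '''
--
--     split_email = []
--
--     #find the index of '@'
--     indexof_ampersand = email.index('@')
--
--
--     for value in range(len(email)):
--         if email[value].isalnum():
--             split_email.append(email[value])
--         elif email[value] == '+':
--             split_email.append(email[indexof_ampersand:])
--             break
--         else:
--             continue
--     return ''.join(split_email)
-- ===== SOURCE B (Python) =====
-- def splitEmails(email):
--     at = email.index('@')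
--     plus = email.find('+')
--     if plus == -1:
--         return ''.join(filter(str.isalnum, email))
--     return ''.join(filter(str.isalnum, email[:plus])) + email[at:]
-- ===== Notes on version B (the rewrite author's own statement) =====
-- stated objective: simpler
-- what changed: Replaces A's char-by-char loop with early break by precomputing the first '+' position, then filtering the pre-'+' slice for alphanumerics and appending the '@'-suffix slice (no '+': filter the whole string); Pre_ excludes strings without '@', on which both A and B raise ValueError.
import Mathlib
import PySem

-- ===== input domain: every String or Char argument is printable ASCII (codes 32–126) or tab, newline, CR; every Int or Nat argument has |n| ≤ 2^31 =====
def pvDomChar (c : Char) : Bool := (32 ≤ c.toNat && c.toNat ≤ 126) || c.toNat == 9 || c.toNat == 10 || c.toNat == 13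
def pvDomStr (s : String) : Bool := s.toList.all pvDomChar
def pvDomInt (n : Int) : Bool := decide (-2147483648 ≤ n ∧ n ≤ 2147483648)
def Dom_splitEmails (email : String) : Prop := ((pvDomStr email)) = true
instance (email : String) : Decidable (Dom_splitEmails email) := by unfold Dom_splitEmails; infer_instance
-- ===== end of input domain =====

-- B is simpler: it locates the first '+' up front, then filters the pre-'+' slice and appends the
-- '@'-suffix slice, instead of A's char-by-char loop with an early break. Return values agree on Pre_.

-- ===== PORT A =====
-- the for-loop over range(len(email)) with break, ported as structural recursion over the chars;
-- 'dom' is the precomputed slice email[indexof_ampersand:]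
def splitEmailsLoop (dom : List Char) : List Char → List Char
  | [] => []
  | c :: rest =>
    if PySem.Chars.isalnum c then c :: splitEmailsLoop dom rest
    else if c = '+' then dom
    else splitEmailsLoop dom rest

-- email.index('@') is PySem.Chars.find … ['@']; Pre_splitEmails excludes the ValueError case ('@' absent)
def splitEmails (email : String) : String :=
  String.ofList (splitEmailsLoop
    (PySem.List.slice email.toList (some (PySem.Chars.find email.toList ['@'])) none)
    email.toList)

-- ===== PORT B =====
-- plus = email.find('+'); the two branches of Source B in the same order
def splitEmails_alt (email : String) : String :=
  if PySem.Chars.find email.toList ['+'] = -1 then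
    String.ofList (email.toList.filter PySem.Chars.isalnum)
  else
    String.ofList
      ((PySem.List.slice email.toList none (some (PySem.Chars.find email.toList ['+']))).filter
          PySem.Chars.isalnum
        ++ PySem.List.slice email.toList (some (PySem.Chars.find email.toList ['@'])) none)

-- ===== PRECONDITION & SPEC =====
-- Pre_ excludes exactly the inputs without '@', on which A's email.index('@') raises ValueError (B raises too).
def Pre_splitEmails (email : String) : Prop := PySem.Str.isIn "@" email = true
instance (email : String) : Decidable (Pre_splitEmails email) := by unfold Pre_splitEmails; infer_instance
def pvWitness_splitEmails : String := "a.b+c@x.y"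

def Spec_splitEmails (email : String) (out : String) : Prop := out = splitEmails_alt email
instance (email : String) (out : String) : Decidable (Spec_splitEmails email out) := by unfold Spec_splitEmails; infer_instance

-- ===== CLAIM (what is proved, stated in full; the proofs are below) =====
def Claim_equal_splitEmails : Prop := ∀ (email : String), Dom_splitEmails email → Pre_splitEmails email → Spec_splitEmails email (splitEmails email)

-- ===== LEMMAS AND PROOFS =====

-- find.go with a shifted start index, relative to start 0
theorem findGo_shift (sub : List Char) (s : List Char) (k : Nat) :
    PySem.Chars.find.go sub s k =
      if PySem.Chars.find.go sub s 0 = -1 then -1 else PySem.Chars.find.go sub s 0 + k := by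
  induction s generalizing k with
  | nil => simp [PySem.Chars.find.go]; split <;> simp
  | cons h t ih =>
    simp only [PySem.Chars.find.go]
    by_cases hp : sub.isPrefixOf (h :: t) = true
    · simp [hp]
    · simp [hp]
      rw [ih (k + 1), ih 1]
      by_cases hm : PySem.Chars.find.go sub t 0 = -1
      · simp [hm]
      · have h0 : -1 ≤ PySem.Chars.find.go sub t 0 := by
          have := PySem.Chars.neg_one_le_find t sub
          simpa [PySem.Chars.find] using this
        have : PySem.Chars.find.go sub t 0 + 1 ≠ -1 := by omega
        simp [hm, this]; ring

-- recurrence for single-character find on a cons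
theorem find_singleton_cons (c x : Char) (cs : List Char) :
    PySem.Chars.find (c :: cs) [x] =
      if c = x then 0
      else if PySem.Chars.find cs [x] = -1 then -1 else PySem.Chars.find cs [x] + 1 := by
  have hgo : PySem.Chars.find (c :: cs) [x]
      = if (x == c) then 0 else PySem.Chars.find.go [x] cs 1 := by
    simp [PySem.Chars.find, PySem.Chars.find.go, List.isPrefixOf]
  rw [hgo, findGo_shift]
  have h0 : PySem.Chars.find.go [x] cs 0 = PySem.Chars.find cs [x] := rfl
  by_cases h : c = x
  · simp [h]
  · have hb : (x == c) = false := by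
      simp only [beq_eq_false_iff_ne]; exact fun e => h e.symm
    simp only [hb, if_false, h, h0]
    norm_num

theorem find_singleton_nonneg {cs : List Char} {x : Char}
    (h : PySem.Chars.find cs [x] ≠ -1) : 0 ≤ PySem.Chars.find cs [x] := by
  have := PySem.Chars.neg_one_le_find cs [x]
  omega

-- '+' is not alphanumeric
theorem plus_not_alnum : PySem.Chars.isalnum '+' = false := by decide

-- the heart: A's loop equals B's slice/filter expression, for any domain suffix
theorem loop_eq_alt (dom : List Char) (cs : List Char) :
    splitEmailsLoop dom cs =
      if PySem.Chars.find cs ['+'] = -1 then cs.filter PySem.Chars.isalnum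
      else (cs.take (PySem.Chars.find cs ['+']).toNat).filter PySem.Chars.isalnum ++ dom := by
  induction cs with
  | nil => simp [splitEmailsLoop, PySem.Chars.find, PySem.Chars.find.go]
  | cons c rest ih =>
    rw [find_singleton_cons]
    by_cases hc : c = '+'
    · subst hc
      simp [splitEmailsLoop, plus_not_alnum]
    · simp only [hc, if_false]
      by_cases hr : PySem.Chars.find rest ['+'] = -1
      · simp only [hr, if_true]
        by_cases ha : PySem.Chars.isalnum c = true
        · simp [splitEmailsLoop, ha, ih, hr]
        · simp [splitEmailsLoop, ha, hc, ih, hr]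
      · have h0 : 0 ≤ PySem.Chars.find rest ['+'] := find_singleton_nonneg hr
        have hne : PySem.Chars.find rest ['+'] + 1 ≠ -1 := by omega
        have htn : (PySem.Chars.find rest ['+'] + 1).toNat
            = (PySem.Chars.find rest ['+']).toNat + 1 := by omega
        simp only [hr, if_false, hne, if_false, htn, List.take_succ_cons]
        by_cases ha : PySem.Chars.isalnum c = true
        · simp [splitEmailsLoop, ha, ih, hr]
        · simp [splitEmailsLoop, ha, hc, ih, hr]

-- ===== VERDICT (by name: the statement is the Claim_ definition above) =====
theorem splitEmails_spec : Claim_equal_splitEmails := by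
  intro email _ _
  show splitEmails email = splitEmails_alt email
  unfold splitEmails splitEmails_alt
  rw [loop_eq_alt]
  by_cases hp : PySem.Chars.find email.toList ['+'] = -1
  · simp [hp]
  · have h0 : 0 ≤ PySem.Chars.find email.toList ['+'] := find_singleton_nonneg hp
    simp only [hp, if_false]
    rw [PySem.List.slice_to _ h0]
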